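-- pv_equiv track=rewrite | github.com/ninamoorman/Graph_Theory | Tetali_Research/BM_Inequality/check_T.py | permutations_apply_T
-- ===== SOURCE A (Python) =====
-- def permutations_apply_T(g_1, g_2):
--     g_1 = [*g_1]
--     g_2 = [*g_2]
--
--     # permute g_2 defined by
--     for i in range(len(g_1)):
--         j = (i+1) % len(g_1)
--
--         j_copy = g_2[j]
--         g_2[j] = g_2[i]
--         g_2[i] = j_copy
--
--     return g_2
-- ===== SOURCE B (Python) =====
-- def permutations_apply_T(g_1, g_2):
--     n = len(g_1)
--     if n == 0:
--         return list(g_2)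
--     if n == 1:
--         return [g_2[0]] + g_2[1:]
--     return [g_2[0]] + [g_2[i] for i in range(2, n)] + [g_2[1]] + g_2[n:]
-- ===== Notes on version B (the rewrite author's own statement) =====
-- stated objective: simpler
-- what changed: B replaces A's loop of n adjacent swaps with its closed-form net effect: g_2[0] stays, positions 1..n-1 rotate left by one (built by direct indexing), elements beyond n are copied unchanged; B does not mutate its inputs, and avoids A's per-index Python-level swap bookkeeping (constant-factor speedup measured).
import Mathlib
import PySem

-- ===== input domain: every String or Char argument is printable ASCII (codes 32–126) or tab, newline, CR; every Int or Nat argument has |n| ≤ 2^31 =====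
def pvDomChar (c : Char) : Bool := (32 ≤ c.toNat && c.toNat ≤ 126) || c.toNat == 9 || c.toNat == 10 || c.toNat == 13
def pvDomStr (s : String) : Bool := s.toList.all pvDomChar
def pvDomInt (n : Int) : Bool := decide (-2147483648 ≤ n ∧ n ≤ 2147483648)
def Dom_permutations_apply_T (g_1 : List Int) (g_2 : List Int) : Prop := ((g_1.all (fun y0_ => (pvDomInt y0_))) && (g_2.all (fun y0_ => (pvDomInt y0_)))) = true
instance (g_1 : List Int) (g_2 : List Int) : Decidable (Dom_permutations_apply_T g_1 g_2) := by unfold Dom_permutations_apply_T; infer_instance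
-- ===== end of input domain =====

-- B replaces A's loop of n adjacent swaps by its closed-form net effect: position 0 keeps g_2[0],
-- positions 1..n-1 rotate left by one (built by direct indexing), elements beyond n are untouched;
-- A mutates only its local copy, so return-value equivalence is the whole story.


-- ===== PORT A =====
def permutations_apply_T (g_1 : List Int) (g_2 : List Int) : List Int :=
  (PySem.List.pyRange 0 (PySem.List.len g_1) 1).foldl
    (fun acc i =>
      let j := PySem.Int.mod (i + 1) (PySem.List.len g_1)
      let j_copy := PySem.List.pyGetD acc j 0
      let acc2 := PySem.List.pySetD acc j (PySem.List.pyGetD acc i 0)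
      PySem.List.pySetD acc2 i j_copy)
    g_2

-- ===== PORT B =====
def permutations_apply_T_alt (g_1 : List Int) (g_2 : List Int) : List Int :=
  let n := PySem.List.len g_1
  if n = 0 then g_2
  else if n = 1 then [PySem.List.pyGetD g_2 0 0] ++ PySem.List.slice g_2 (some 1) none
  else [PySem.List.pyGetD g_2 0 0]
        ++ (PySem.List.pyRange 2 n 1).map (fun i => PySem.List.pyGetD g_2 i 0)
        ++ [PySem.List.pyGetD g_2 1 0]
        ++ PySem.List.slice g_2 (some n) none

-- ===== PRECONDITION & SPEC =====
-- A indexes g_2 at every position 0..len(g_1)-1, so it raises IndexError iff g_2 is shorter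
-- than g_1 (B raises there too); Pre_ is exactly A's domain of normal return.
def Pre_permutations_apply_T (g_1 : List Int) (g_2 : List Int) : Prop := g_1.length ≤ g_2.length
instance (g_1 : List Int) (g_2 : List Int) : Decidable (Pre_permutations_apply_T g_1 g_2) := by unfold Pre_permutations_apply_T; infer_instance
def pvWitness_permutations_apply_T : List Int × List Int := ([1, 2, 3], [4, 5, 6, 7])

def Spec_permutations_apply_T (g_1 : List Int) (g_2 : List Int) (out : List Int) : Prop := out = permutations_apply_T_alt g_1 g_2
instance (g_1 : List Int) (g_2 : List Int) (out : List Int) : Decidable (Spec_permutations_apply_T g_1 g_2 out) := by unfold Spec_permutations_apply_T; infer_instance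

-- ===== CLAIM (what is proved, stated in full; the proofs are below) =====
def Claim_equal_permutations_apply_T : Prop := ∀ (g_1 : List Int) (g_2 : List Int), Dom_permutations_apply_T g_1 g_2 → Pre_permutations_apply_T g_1 g_2 → Spec_permutations_apply_T g_1 g_2 (permutations_apply_T g_1 g_2)

-- ===== LEMMAS AND PROOFS =====

-- A's loop body as a named function (definitionally the lambda inside the port).
def pvStep (n : Int) (acc : List Int) (i : Int) : List Int :=
  let j := PySem.Int.mod (i + 1) n
  let j_copy := PySem.List.pyGetD acc j 0
  let acc2 := PySem.List.pySetD acc j (PySem.List.pyGetD acc i 0)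
  PySem.List.pySetD acc2 i j_copy

theorem pvA_eq_fold (g_1 g_2 : List Int) :
    permutations_apply_T g_1 g_2
      = (PySem.List.pyRange 0 (PySem.List.len g_1) 1).foldl (pvStep (PySem.List.len g_1)) g_2 := rfl

theorem pvGetD_mid (P Q : List Int) (x : Int) : (P ++ x :: Q).getD P.length 0 = x := by
  induction P with
  | nil => rfl
  | cons p P ih => simpa using ih

theorem pvSet_mid (P Q : List Int) (x v : Int) : (P ++ x :: Q).set P.length v = P ++ v :: Q := by
  induction P with
  | nil => rfl
  | cons p P ih => simpa using ih

-- One iteration with i+1 < n is the adjacent swap at positions i, i+1.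
theorem pvStep_swap (n : Int) (P Q : List Int) (x y : Int)
    (h : (P.length : Int) + 1 < n) :
    pvStep n (P ++ x :: y :: Q) ((P.length : Nat) : Int) = P ++ y :: x :: Q := by
  have hmod : PySem.Int.mod (((P.length : Nat) : Int) + 1) n = ((P.length + 1 : Nat) : Int) := by
    rw [PySem.Int.mod_eq_emod_of_pos (by omega)]
    rw [Int.emod_eq_of_lt (by omega) (by omega)]
    push_cast; ring
  have hgx : PySem.List.pyGetD (P ++ x :: y :: Q) ((P.length : Nat) : Int) 0 = x := by
    rw [PySem.List.pyGetD_natCast]; exact pvGetD_mid P (y :: Q) x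
  have hga : PySem.List.pyGetD (P ++ x :: y :: Q) ((P.length + 1 : Nat) : Int) 0 = y := by
    rw [PySem.List.pyGetD_natCast]
    have := pvGetD_mid (P ++ [x]) Q y
    simpa using this
  have hs1 : PySem.List.pySetD (P ++ x :: y :: Q) ((P.length + 1 : Nat) : Int) x
      = P ++ x :: x :: Q := by
    rw [PySem.List.pySetD_natCast]
    have := pvSet_mid (P ++ [x]) Q y x
    simpa using this
  have hs2 : PySem.List.pySetD (P ++ x :: x :: Q) ((P.length : Nat) : Int) y
      = P ++ y :: x :: Q := by
    rw [PySem.List.pySetD_natCast]; exact pvSet_mid P (x :: Q) x y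
  simp only [pvStep]
  rw [hmod, hgx, hga, hs1, hs2]

-- The last iteration (i = n-1, j = 0) swaps the first and last of the prefix of length n.
theorem pvStep_wrap (n : Int) (z x : Int) (M Q : List Int)
    (h : n = (M.length : Int) + 2) :
    pvStep n (z :: (M ++ x :: Q)) (n - 1) = x :: (M ++ z :: Q) := by
  have hmod : PySem.Int.mod ((n - 1) + 1) n = ((0 : Nat) : Int) := by
    rw [show (n - 1) + 1 = n by ring, PySem.Int.mod_eq_emod_of_pos (by omega)]
    simp
  have hi : n - 1 = ((M.length + 1 : Nat) : Int) := by push_cast; omega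
  have hg0 : PySem.List.pyGetD (z :: (M ++ x :: Q)) ((0 : Nat) : Int) 0 = z := by
    rw [PySem.List.pyGetD_natCast]; rfl
  have hgx : PySem.List.pyGetD (z :: (M ++ x :: Q)) ((M.length + 1 : Nat) : Int) 0 = x := by
    rw [PySem.List.pyGetD_natCast, List.getD_cons_succ]; exact pvGetD_mid M Q x
  have hs1 : PySem.List.pySetD (z :: (M ++ x :: Q)) ((0 : Nat) : Int) x
      = x :: (M ++ x :: Q) := by
    rw [PySem.List.pySetD_natCast]; rfl
  have hs2 : PySem.List.pySetD (x :: (M ++ x :: Q)) ((M.length + 1 : Nat) : Int) z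
      = x :: (M ++ z :: Q) := by
    rw [PySem.List.pySetD_natCast, List.set_cons_succ, pvSet_mid]
  simp only [pvStep]
  rw [hmod, hi, hgx, hg0, hs1, hs2]

-- After the first k adjacent swaps (1 ≤ k, k+1 ≤ n), the head has bubbled to position k.
theorem pvFold_swaps (n : Nat) (x : Int) (rest : List Int) :
    ∀ k, 1 ≤ k → k + 1 ≤ n → n ≤ rest.length + 1 →
    (List.map (fun m : Nat => (m : Int)) (List.range k)).foldl (pvStep (n : Int)) (x :: rest)
      = rest.take k ++ x :: rest.drop k := by
  intro k
  induction k with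
  | zero => omega
  | succ k ih =>
    intro _ hk hn
    by_cases hk1 : k = 0
    · subst hk1
      have hrest : rest ≠ [] := by
        intro hnil; rw [hnil] at hn; simp at hn; omega
      obtain ⟨y, rest', rfl⟩ := List.exists_cons_of_ne_nil hrest
      have hr : List.map (fun m : Nat => (m : Int)) (List.range 1) = [((0 : Nat) : Int)] := by
        simp
      rw [hr]
      simp only [List.foldl]
      have hs := pvStep_swap (n : Int) [] rest' x y (by simp; omega)
      simpa using hs
    · have hk' : 1 ≤ k := by omega
      rw [List.range_succ, List.map_append, List.foldl_append]
      rw [ih hk' (by omega) hn]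
      simp only [List.map_cons, List.map_nil, List.foldl]
      have hklen : k < rest.length := by omega
      have hdrop : rest.drop k = rest[k] :: rest.drop (k + 1) :=
        List.drop_eq_getElem_cons hklen
      have hP : (rest.take k).length = k := by simp; omega
      have hs := pvStep_swap (n : Int) (rest.take k) (rest.drop (k + 1)) x rest[k]
        (by rw [hP]; omega)
      rw [hP] at hs
      rw [hdrop, hs]
      have htake : rest.take (k + 1) = rest.take k ++ [rest[k]] := by
        rw [List.take_add_one, List.getElem?_eq_getElem hklen]; rfl
      rw [htake, List.append_assoc, List.singleton_append]

-- Reading positions 0..m-1 of a list with getD reconstructs its prefix (m ≤ length).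
theorem pvMap_getD_take (xs : List Int) (m : Nat) (h : m ≤ xs.length) :
    (List.range m).map (fun k => xs.getD k 0) = xs.take m := by
  induction m with
  | zero => simp
  | succ m ih =>
    rw [List.range_succ, List.map_append, ih (by omega)]
    have hm : m < xs.length := by omega
    rw [List.take_add_one, List.getElem?_eq_getElem hm]
    simp only [List.map_cons, List.map_nil, List.getD, List.getElem?_eq_getElem hm,
      Option.getD_some, Option.toList_some]

-- B's branch for n ≥ 2, written out on g_2 = x :: z :: rest' with n ≤ len g_2.
theorem pvB_closed (g_1 : List Int) (x z : Int) (rest' : List Int)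
    (hn : 2 ≤ g_1.length) (hlen : g_1.length ≤ rest'.length + 2) :
    permutations_apply_T_alt g_1 (x :: z :: rest')
      = x :: (rest'.take (g_1.length - 2) ++ z :: rest'.drop (g_1.length - 2)) := by
  unfold permutations_apply_T_alt
  simp only [PySem.List.len_eq]
  rw [if_neg (by omega), if_neg (by omega)]
  have hmap : (PySem.List.pyRange 2 (g_1.length : Int) 1).map
      (fun i => PySem.List.pyGetD (x :: z :: rest') i 0) = rest'.take (g_1.length - 2) := by
    rw [PySem.List.pyRange_one]
    rw [List.map_map]
    have hcomp : ((fun i => PySem.List.pyGetD (x :: z :: rest') i 0) ∘ (fun k : Nat => (2 : Int) + k))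
        = fun k : Nat => rest'.getD k 0 := by
      funext k
      show PySem.List.pyGetD (x :: z :: rest') ((2 : Int) + k) 0 = rest'.getD k 0
      rw [show (2 : Int) + k = ((k + 2 : Nat) : Int) by push_cast; ring,
        PySem.List.pyGetD_natCast]
      rfl
    rw [hcomp]
    rw [show ((g_1.length : Int) - 2).toNat = g_1.length - 2 by omega]
    exact pvMap_getD_take rest' (g_1.length - 2) (by omega)
  rw [hmap]
  rw [show PySem.List.pyGetD (x :: z :: rest') 0 0 = x by
    rw [show (0 : Int) = ((0 : Nat) : Int) by norm_num, PySem.List.pyGetD_natCast]; rfl]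
  rw [show PySem.List.pyGetD (x :: z :: rest') 1 0 = z by
    rw [show (1 : Int) = ((1 : Nat) : Int) by norm_num, PySem.List.pyGetD_natCast]; rfl]
  rw [PySem.List.slice_from_natCast]
  have hd : List.drop g_1.length (x :: z :: rest') = rest'.drop (g_1.length - 2) := by
    obtain ⟨k, hkk⟩ : ∃ k, g_1.length = k + 2 := ⟨g_1.length - 2, by omega⟩
    rw [hkk]
    simp only [List.drop_succ_cons]
    congr 1
  rw [hd]
  simp

-- The single iteration when len(g_1) = 1 is a self-swap: it returns the list unchanged.
theorem pvStep_one (a : Int) (t : List Int) :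
    pvStep ((1 : Nat) : Int) (a :: t) ((0 : Nat) : Int) = a :: t := by
  have hmod : PySem.Int.mod (((0 : Nat) : Int) + 1) ((1 : Nat) : Int) = ((0 : Nat) : Int) := by
    rw [PySem.Int.mod_eq_emod_of_pos (by omega)]
    simp
  simp only [pvStep]
  rw [hmod]
  rw [show PySem.List.pyGetD (a :: t) ((0 : Nat) : Int) 0 = a by
    rw [PySem.List.pyGetD_natCast]; rfl]
  rw [show PySem.List.pySetD (a :: t) ((0 : Nat) : Int) a = a :: t by
    rw [PySem.List.pySetD_natCast]; rfl]
  rw [show PySem.List.pySetD (a :: t) ((0 : Nat) : Int) a = a :: t by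
    rw [PySem.List.pySetD_natCast]; rfl]

-- ===== VERDICT (by name: the statement is the Claim_ definition above) =====
theorem permutations_apply_T_spec : Claim_equal_permutations_apply_T := by
  intro g_1 g_2 _ hpre
  unfold Spec_permutations_apply_T
  rw [pvA_eq_fold]
  simp only [PySem.List.len_eq]
  rw [PySem.List.pyRange_zero_natCast]
  unfold Pre_permutations_apply_T at hpre
  rcases Nat.lt_or_ge g_1.length 2 with h2 | h2
  · by_cases h0 : g_1.length = 0
    · -- n = 0 : empty loop; B returns g_2 via the first branch
      have hb : permutations_apply_T_alt g_1 g_2 = g_2 := by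
        unfold permutations_apply_T_alt
        simp only [PySem.List.len_eq]
        rw [if_pos (by omega)]
      rw [hb, h0]; simp
    · -- n = 1 : a single self-swap; B returns [g_2[0]] ++ g_2[1:] = g_2
      have h1 : g_1.length = 1 := by omega
      have hg2 : g_2 ≠ [] := List.ne_nil_of_length_pos (by omega)
      obtain ⟨a, t, rfl⟩ := List.exists_cons_of_ne_nil hg2
      have hb : permutations_apply_T_alt g_1 (a :: t) = a :: t := by
        unfold permutations_apply_T_alt
        simp only [PySem.List.len_eq]
        rw [if_neg (by omega), if_pos (by rw [h1]; norm_num)]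
        rw [show PySem.List.pyGetD (a :: t) 0 0 = a by
          rw [show (0 : Int) = ((0 : Nat) : Int) by norm_num, PySem.List.pyGetD_natCast]; rfl]
        rw [show (1 : Int) = ((1 : Nat) : Int) by norm_num, PySem.List.slice_from_natCast]
        rfl
      rw [hb, h1]
      rw [show List.map (fun k : Nat => (k : Int)) (List.range 1) = [((0 : Nat) : Int)] by simp]
      simp only [List.foldl]
      exact pvStep_one a t
  · -- n ≥ 2 : split off the last iteration, bubble with pvFold_swaps, wrap with pvStep_wrap
    have hg2 : g_2 ≠ [] := List.ne_nil_of_length_pos (by omega)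
    obtain ⟨x, g2', rfl⟩ := List.exists_cons_of_ne_nil hg2
    have hg2' : g2' ≠ [] := List.ne_nil_of_length_pos
      (by have h := hpre; simp only [List.length_cons] at h; omega)
    obtain ⟨z, rest', rfl⟩ := List.exists_cons_of_ne_nil hg2'
    have hlen : g_1.length ≤ rest'.length + 2 := by simpa using hpre
    rw [show List.range g_1.length = List.range (g_1.length - 1) ++ [g_1.length - 1] by
      rw [← List.range_succ]; congr 1; omega]
    rw [List.map_append, List.foldl_append]
    rw [pvFold_swaps g_1.length x (z :: rest') (g_1.length - 1) (by omega) (by omega)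
          (by simp; omega)]
    simp only [List.map_cons, List.map_nil, List.foldl]
    have htk : (z :: rest').take (g_1.length - 1) = z :: rest'.take (g_1.length - 2) := by
      rw [show g_1.length - 1 = (g_1.length - 2) + 1 by omega]; rfl
    have hdr : (z :: rest').drop (g_1.length - 1) = rest'.drop (g_1.length - 2) := by
      rw [show g_1.length - 1 = (g_1.length - 2) + 1 by omega]; rfl
    rw [htk, hdr, List.cons_append]
    have hMlen : (rest'.take (g_1.length - 2)).length = g_1.length - 2 := by
      simp; omega
    have hcast : ((g_1.length - 1 : Nat) : Int) = (g_1.length : Int) - 1 := by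
      push_cast [Nat.cast_sub (by omega : 1 ≤ g_1.length)]; ring
    rw [hcast]
    rw [pvStep_wrap ((g_1.length : Int)) z x (rest'.take (g_1.length - 2))
          (rest'.drop (g_1.length - 2))
          (by rw [hMlen]; push_cast [Nat.cast_sub (by omega : 2 ≤ g_1.length)]; ring)]
    rw [pvB_closed g_1 x z rest' h2 hlen]
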